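-- pv_equiv track=rewrite | github.com/uzairgheewala/HDLOpt | scripts/parser.py | _parse_port_lines
-- ===== SOURCE A (Python) =====
-- from typing import List, Dict, Optional, Union
--
-- def _parse_port_lines(port_text: str) -> List[str]:
--     """Split port text into individual port declarations, handling comments and multi-line declarations.
--
--     Args:
--         port_text: Raw port text from module definition
--
--     Returns:
--         List of cleaned port declarations
--     """
--     ports = []
--     current_port = []
--     lines = port_text.split('\n')
--     i = 0
--
--     while i < len(lines):
--         line = lines[i].strip()
--
--         # Skip empty lines and comment-only lines
--         if not line or line.startswith('//'):
--             i += 1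
--             continue
--
--         # Check if this is a port declaration line (starts with input/output)
--         if line.startswith('input') or line.startswith('output'):
--             # Start collecting a new port declaration
--             port_parts = []
--
--             # Keep collecting until we find a comma or semicolon
--             while i < len(lines):
--                 line = lines[i].strip()
--
--                 # Skip comment-only lines in the middle of a declaration
--                 if not line or line.startswith('//'):
--                     i += 1
--                     continue
--
--                 # Extract content before any comment
--                 if '//' in line:
--                     line, comment = line.split('//', 1)
--                     line = line.strip()
--
--                 port_parts.append(line)
--
--                 # Check if this port declaration is complete
--                 if line.endswith(',') or line.endswith(';'):
--                     break
--
--                 i += 1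
--
--             # Join the parts and clean up
--             port_decl = ' '.join(port_parts).rstrip(',;')
--             if port_decl:
--                 ports.append(port_decl)
--
--         i += 1
--
--     return ports
-- ===== SOURCE B (Python) =====
-- from typing import List
--
--
-- def _parse_port_lines(port_text: str) -> List[str]:
--     """Two-pass version: pass 1 cleans the lines, pass 2 groups declarations with a flag loop."""
--     # Pass 1: strip every line; drop blank lines and comment-only lines.
--     lines = [s for s in (raw.strip() for raw in port_text.split('\n'))
--              if s and not s.startswith('//')]
--
--     # Pass 2: group lines into declarations with a `collecting` flag.
--     ports = []
--     parts = []
--     collecting = False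
--     for s in lines:
--         if not collecting:
--             if not (s.startswith('input') or s.startswith('output')):
--                 continue
--             collecting = True
--         if '//' in s:
--             s = s.split('//', 1)[0].strip()
--         parts.append(s)
--         if s.endswith(',') or s.endswith(';'):
--             decl = ' '.join(parts).rstrip(',;')
--             if decl:
--                 ports.append(decl)
--             parts = []
--             collecting = False
--     if collecting:
--         decl = ' '.join(parts).rstrip(',;')
--         if decl:
--             ports.append(decl)
--     return ports
-- ===== Notes on version B (the rewrite author's own statement) =====
-- stated objective: alternative
-- what changed: A's nested index-sharing while loops (an inner while re-scanning from the same index i) are replaced by a two-pass decomposition: pass 1 strips all lines and filters out blank/comment-only ones, pass 2 groups the survivors into declarations with a single fold carrying a `collecting` flag.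
import Mathlib
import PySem

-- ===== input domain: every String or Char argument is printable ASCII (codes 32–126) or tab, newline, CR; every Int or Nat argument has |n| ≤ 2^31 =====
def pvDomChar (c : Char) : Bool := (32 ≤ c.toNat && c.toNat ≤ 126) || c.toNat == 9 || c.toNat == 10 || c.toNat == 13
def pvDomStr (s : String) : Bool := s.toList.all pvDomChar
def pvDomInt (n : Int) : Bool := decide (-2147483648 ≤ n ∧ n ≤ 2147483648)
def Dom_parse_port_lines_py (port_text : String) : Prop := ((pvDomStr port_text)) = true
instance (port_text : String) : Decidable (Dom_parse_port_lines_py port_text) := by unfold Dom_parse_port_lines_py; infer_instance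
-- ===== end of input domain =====

-- B splits A's nested index-sharing while loops into two passes — clean the lines, then group
-- declarations with a `collecting` flag fold — same return value (objective: alternative decomposition).

-- shared primitive snippets (both Pythons contain these same inline fragments):
-- `line.split('//', 1)[0].strip() if '//' in line else line`
def pvStripComment (line : String) : String :=
  if PySem.Str.isIn "//" line = true then
    PySem.Str.strip (((PySem.Str.splitMax? line "//" 1).getD [line]).getD 0 line)
  else line

-- hand port of `s.rstrip(',;')` (PySem has only the two-sided stripChars): exact — drops
-- exactly the maximal run of trailing ',' / ';' characters, as Python's str.rstrip does.
def pvRstripCommaSemi (s : String) : String :=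
  String.ofList ((s.toList.reverse.dropWhile (fun c => c = ',' || c = ';')).reverse)

-- `port_decl = ' '.join(parts).rstrip(',;'); if port_decl: …append(port_decl)` as the appended list
def pvDeclList (parts : List String) : List String :=
  let port_decl := pvRstripCommaSemi (PySem.Str.join " " parts)
  if port_decl = "" then [] else [port_decl]

-- ===== PORT A =====
-- A's inner `while i < len(lines)` collector: consumes raw lines (i ↦ the remaining suffix),
-- returns (port_parts, lines remaining after the break line has been consumed by `i += 1`).
def pvAInner : List String → List String → List String × List String
  | [], parts => (parts, [])
  | l :: rs, parts =>
    let line := PySem.Str.strip l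
    if line = "" ∨ PySem.Str.startswith line "//" = true then pvAInner rs parts
    else
      let line2 := pvStripComment line
      let parts2 := parts ++ [line2]
      if PySem.Str.endswith line2 "," = true ∨ PySem.Str.endswith line2 ";" = true then
        (parts2, rs)
      else pvAInner rs parts2

-- termination facts for the outer loop (the port cites them in decreasing_by)
theorem pvAInner_snd_le (rest : List String) (parts : List String) :
    (pvAInner rest parts).2.length ≤ rest.length := by
  induction rest generalizing parts with
  | nil => simp [pvAInner]
  | cons l rs ih =>
    by_cases h1 : PySem.Str.strip l = "" ∨ PySem.Str.startswith (PySem.Str.strip l) "//" = true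
    · simp only [pvAInner, if_pos h1]
      exact le_trans (ih parts) (by simp)
    · simp only [pvAInner, if_neg h1]
      split
      · simp
      · exact le_trans (ih _) (by simp)

theorem pvAInner_cons_snd_le (l : String) (rs parts : List String)
    (h1 : ¬ (PySem.Str.strip l = "" ∨ PySem.Str.startswith (PySem.Str.strip l) "//" = true)) :
    (pvAInner (l :: rs) parts).2.length ≤ rs.length := by
  simp only [pvAInner, if_neg h1]
  split
  · simp
  · exact pvAInner_snd_le rs _

-- A's outer `while i < len(lines)` loop
def pvAOuter : List String → List String
  | [] => []
  | l :: rs =>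
    let line := PySem.Str.strip l
    if _h1 : line = "" ∨ PySem.Str.startswith line "//" = true then pvAOuter rs
    else if PySem.Str.startswith line "input" = true ∨ PySem.Str.startswith line "output" = true then
      let pr := pvAInner (l :: rs) []
      pvDeclList pr.1 ++ pvAOuter pr.2
    else pvAOuter rs
termination_by raw => raw.length
decreasing_by
  · simp
  · have := pvAInner_cons_snd_le l rs [] _h1
    simp only [List.length_cons]
    omega
  · simp

def parse_port_lines_py (port_text : String) : List String :=
  pvAOuter ((PySem.Str.split? port_text "\n").getD [])

-- ===== PORT B =====
-- B pass 2 loop body: state = (collecting, parts, ports)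
def pvBStep (st : Bool × List String × List String) (s : String) : Bool × List String × List String :=
  if st.1 = false ∧ ¬ (PySem.Str.startswith s "input" = true ∨ PySem.Str.startswith s "output" = true) then
    st
  else
    let s2 := pvStripComment s
    let parts2 := st.2.1 ++ [s2]
    if PySem.Str.endswith s2 "," = true ∨ PySem.Str.endswith s2 ";" = true then
      (false, [], st.2.2 ++ pvDeclList parts2)
    else (true, parts2, st.2.2)

-- B's final flush of an unterminated declaration
def pvBFlush (st : Bool × List String × List String) : List String :=
  if st.1 = true then st.2.2 ++ pvDeclList st.2.1 else st.2.2

def parse_port_lines_py_alt (port_text : String) : List String :=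
  let lines := ((PySem.Str.split? port_text "\n").getD []).map PySem.Str.strip
  let cleaned := lines.filter (fun s => !(s == "" || PySem.Str.startswith s "//"))
  pvBFlush (cleaned.foldl pvBStep (false, [], []))

-- ===== PRECONDITION & SPEC =====
def Spec_parse_port_lines_py (port_text : String) (out : List String) : Prop := out = parse_port_lines_py_alt port_text
instance (port_text : String) (out : List String) : Decidable (Spec_parse_port_lines_py port_text out) := by unfold Spec_parse_port_lines_py; infer_instance

-- ===== CLAIM (what is proved, stated in full; the proofs are below) =====
def Claim_equal_parse_port_lines_py : Prop := ∀ (port_text : String), Dom_parse_port_lines_py port_text → Spec_parse_port_lines_py port_text (parse_port_lines_py port_text)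

-- ===== LEMMAS AND PROOFS =====
-- B's pass 1, as a function of the raw line list
def pvClean (raw : List String) : List String :=
  (raw.map PySem.Str.strip).filter (fun s => !(s == "" || PySem.Str.startswith s "//"))

theorem pvClean_cons_skip (l : String) (rs : List String)
    (h1 : PySem.Str.strip l = "" ∨ PySem.Str.startswith (PySem.Str.strip l) "//" = true) :
    pvClean (l :: rs) = pvClean rs := by
  have hc : (PySem.Str.strip l == "" || PySem.Str.startswith (PySem.Str.strip l) "//") = true := by
    rcases h1 with h | h <;> simp only [h, beq_self_eq_true, Bool.true_or, Bool.or_true]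
  simp only [pvClean, List.map_cons, List.filter_cons, hc, Bool.not_true, Bool.false_eq_true,
    if_false]

theorem pvClean_cons_keep (l : String) (rs : List String)
    (h1 : ¬ (PySem.Str.strip l = "" ∨ PySem.Str.startswith (PySem.Str.strip l) "//" = true)) :
    pvClean (l :: rs) = PySem.Str.strip l :: pvClean rs := by
  rw [not_or] at h1
  have hc : (PySem.Str.strip l == "" || PySem.Str.startswith (PySem.Str.strip l) "//") = false := by
    rw [Bool.or_eq_false_iff]
    exact ⟨beq_eq_false_iff_ne.mpr h1.1, Bool.not_eq_true _ ▸ h1.2⟩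
  simp only [pvClean, List.map_cons, List.filter_cons, hc, Bool.not_false, if_true]

-- main invariant: A's two loops and B's single fold agree, both while collecting (Inner)
-- and while scanning for the next declaration head (Outer)
theorem pvMain : ∀ n (raw : List String), raw.length ≤ n →
    (∀ parts ports : List String,
      ports ++ (pvDeclList (pvAInner raw parts).1 ++ pvAOuter (pvAInner raw parts).2)
        = pvBFlush ((pvClean raw).foldl pvBStep (true, parts, ports)))
    ∧ (∀ ports : List String,
      ports ++ pvAOuter raw = pvBFlush ((pvClean raw).foldl pvBStep (false, [], ports))) := by
  intro n
  induction n with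
  | zero =>
    intro raw hle
    have : raw = [] := List.eq_nil_of_length_eq_zero (Nat.le_zero.mp hle)
    subst this
    constructor
    · intro parts ports; simp [pvAInner, pvAOuter, pvClean, pvBFlush]
    · intro ports; simp [pvAOuter, pvClean, pvBFlush]
  | succ n ih =>
    intro raw hle
    cases raw with
    | nil =>
      constructor
      · intro parts ports; simp [pvAInner, pvAOuter, pvClean, pvBFlush]
      · intro ports; simp [pvAOuter, pvClean, pvBFlush]
    | cons l rs =>
      have hrs : rs.length ≤ n := by simpa using Nat.le_of_succ_le_succ hle
      have hiI := (ih rs hrs).1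
      have hiO := (ih rs hrs).2
      have HInner : ∀ parts ports : List String,
          ports ++ (pvDeclList (pvAInner (l :: rs) parts).1 ++ pvAOuter (pvAInner (l :: rs) parts).2)
            = pvBFlush ((pvClean (l :: rs)).foldl pvBStep (true, parts, ports)) := by
        intro parts ports
        by_cases h1 : PySem.Str.strip l = "" ∨ PySem.Str.startswith (PySem.Str.strip l) "//" = true
        · rw [pvClean_cons_skip l rs h1]
          simp only [pvAInner, if_pos h1]
          exact hiI parts ports
        · rw [pvClean_cons_keep l rs h1]
          simp only [pvAInner, if_neg h1, List.foldl_cons]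
          have hstep : pvBStep (true, parts, ports) (PySem.Str.strip l)
              = (if PySem.Str.endswith (pvStripComment (PySem.Str.strip l)) "," = true
                    ∨ PySem.Str.endswith (pvStripComment (PySem.Str.strip l)) ";" = true then
                   (false, [], ports ++ pvDeclList (parts ++ [pvStripComment (PySem.Str.strip l)]))
                 else (true, parts ++ [pvStripComment (PySem.Str.strip l)], ports)) := by
            unfold pvBStep
            rw [if_neg (by simp)]
          rw [hstep]
          by_cases h2 : PySem.Str.endswith (pvStripComment (PySem.Str.strip l)) "," = true
              ∨ PySem.Str.endswith (pvStripComment (PySem.Str.strip l)) ";" = true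
          · rw [if_pos h2, if_pos h2]
            rw [← hiO (ports ++ pvDeclList (parts ++ [pvStripComment (PySem.Str.strip l)]))]
            simp
          · rw [if_neg h2, if_neg h2]
            exact hiI _ ports
      refine ⟨HInner, ?_⟩
      intro ports
      by_cases h1 : PySem.Str.strip l = "" ∨ PySem.Str.startswith (PySem.Str.strip l) "//" = true
      · rw [pvClean_cons_skip l rs h1]
        simp only [pvAOuter, dif_pos h1]
        exact hiO ports
      · rw [pvClean_cons_keep l rs h1]
        by_cases h2 : PySem.Str.startswith (PySem.Str.strip l) "input" = true
            ∨ PySem.Str.startswith (PySem.Str.strip l) "output" = true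
        · have hA : pvAOuter (l :: rs)
              = pvDeclList (pvAInner (l :: rs) []).1 ++ pvAOuter (pvAInner (l :: rs) []).2 := by
            rw [pvAOuter]
            simp only [dif_neg h1, if_pos h2]
          rw [hA, List.foldl_cons]
          have hstep : pvBStep (false, [], ports) (PySem.Str.strip l)
              = pvBStep (true, [], ports) (PySem.Str.strip l) := by
            unfold pvBStep
            rw [if_neg (fun hc => hc.2 h2),
              if_neg (show ¬(((true : Bool) = false) ∧
                ¬(PySem.Str.startswith (PySem.Str.strip l) "input" = true ∨
                  PySem.Str.startswith (PySem.Str.strip l) "output" = true)) by simp)]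
          rw [hstep, ← List.foldl_cons, ← pvClean_cons_keep l rs h1]
          exact HInner [] ports
        · have hA : pvAOuter (l :: rs) = pvAOuter rs := by
            rw [pvAOuter]
            simp only [dif_neg h1, if_neg h2]
          have hstep : pvBStep (false, [], ports) (PySem.Str.strip l) = (false, [], ports) := by
            unfold pvBStep
            rw [if_pos ⟨rfl, h2⟩]
          rw [hA, List.foldl_cons, hstep]
          exact hiO ports

-- ===== VERDICT (by name: the statement is the Claim_ definition above) =====
theorem parse_port_lines_py_spec : Claim_equal_parse_port_lines_py := by
  intro port_text _
  unfold Spec_parse_port_lines_py parse_port_lines_py parse_port_lines_py_alt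
  have h := (pvMain ((PySem.Str.split? port_text "\n").getD []).length
      ((PySem.Str.split? port_text "\n").getD []) le_rfl).2 []
  simpa [pvClean] using h
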